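-- pv_equiv track=rewrite | github.com/chuckha/Cryptarithm | equation.py | patterns
-- ===== SOURCE A (Python) =====
-- def patterns(words):
--     words = [str(word) for word in words]
--     chars = []
--     patterns = []
--     for word in words:
--         pattern = []
--         for character in word:
--             if character in chars:
--                 pattern.append(chars.index(character))
--             else:
--                 chars.append(character)
--                 pattern.append(chars.index(character))
--         patterns.append(pattern)
--     return patterns
-- ===== SOURCE B (Python) =====
-- def patterns(words):
--     words = [str(word) for word in words]
--     cat = [c for w in words for c in w]
--     code = {c: len(set(cat[:cat.index(c)])) for c in set(cat)}
--     return [[code[c] for c in w] for w in words]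
-- ===== Notes on version B (the rewrite author's own statement) =====
-- stated objective: alternative
-- what changed: Instead of growing a table of seen characters during the scan and emitting list.index per character, B computes each character's code by a closed formula: the number of distinct characters in the concatenation of all words strictly before that character's first occurrence (len(set(cat[:cat.index(c)]))), then encodes every word by lookup.
import Mathlib
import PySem

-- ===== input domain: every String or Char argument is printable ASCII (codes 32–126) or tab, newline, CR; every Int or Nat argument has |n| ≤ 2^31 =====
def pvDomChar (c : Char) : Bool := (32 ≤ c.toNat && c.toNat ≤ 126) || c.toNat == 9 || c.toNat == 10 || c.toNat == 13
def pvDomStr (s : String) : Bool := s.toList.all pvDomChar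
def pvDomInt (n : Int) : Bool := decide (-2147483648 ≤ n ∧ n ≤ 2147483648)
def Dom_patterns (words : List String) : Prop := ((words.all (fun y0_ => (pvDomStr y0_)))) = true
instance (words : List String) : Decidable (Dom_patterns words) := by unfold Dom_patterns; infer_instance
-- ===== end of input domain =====

-- B drops A's incremental table (list grown in the scan, list.index per character) and instead
-- computes each character's code by a closed formula — the number of distinct characters in the
-- concatenation prefix before its first occurrence (objective: alternative).
-- In both ports 'words = [str(w) for w in words]' is the identity on strings and is dropped.

-- ===== PORT A =====
-- inner loop body, one character; chars.index(character) always succeeds (the character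
-- is in chars in both branches), so '.getD 0' is exact
def aChar (st : List Char × List Int) (c : Char) : List Char × List Int :=
  if st.1.contains c then
    (st.1, st.2 ++ [(((PySem.List.index? st.1 c).getD 0 : Nat) : Int)])
  else
    (st.1 ++ [c], st.2 ++ [(((PySem.List.index? (st.1 ++ [c]) c).getD 0 : Nat) : Int)])

-- outer loop body, one word
def aWordStep (st : List Char × List (List Int)) (w : String) : List Char × List (List Int) :=
  let r := w.toList.foldl aChar (st.1, ([] : List Int))
  (r.1, st.2 ++ [r.2])

def patterns (words : List String) : List (List Int) :=
  (words.foldl aWordStep (([] : List Char), ([] : List (List Int)))).2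

-- ===== PORT B =====
-- cat = [c for w in words for c in w]
def bCat (words : List String) : List Char := words.flatMap (fun w => w.toList)

-- the dict comprehension {c: len(set(cat[:cat.index(c)])) for c in set(cat)};
-- cat.index(c) always succeeds (c ranges over set(cat)), so '.getD 0' is exact
def bCode (cat : List Char) : PySem.Dict Char Int :=
  (PySem.Set.ofList cat).foldl
    (fun d c => d.insert c
      (PySem.Set.len (PySem.Set.ofList
        (PySem.List.slice cat none (some (((PySem.List.index? cat c).getD 0 : Nat) : Int))))))
    PySem.Dict.empty

def patterns_alt (words : List String) : List (List Int) :=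
  let cat := bCat words
  let code := bCode cat
  -- code[c]: every character of every word is a key of code, so '.getD 0' is exact
  words.map (fun w => w.toList.map (fun c => (code.get? c).getD 0))

-- ===== PRECONDITION & SPEC =====
def Spec_patterns (words : List String) (out : List (List Int)) : Prop := out = patterns_alt words
instance (words : List String) (out : List (List Int)) : Decidable (Spec_patterns words out) := by unfold Spec_patterns; infer_instance

-- ===== CLAIM (what is proved, stated in full; the proofs are below) =====
def Claim_equal_patterns : Prop := ∀ (words : List String), Dom_patterns words → Spec_patterns words (patterns words)

-- ===== LEMMAS AND PROOFS =====

-- the list of distinct characters in first-appearance order, as A's 'chars' grows it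
def buildChars (C : List Char) (cs : List Char) : List Char :=
  cs.foldl (fun ch c => if ch.contains c then ch else ch ++ [c]) C

-- the value A emits for character c once the table is F
def idxF (F : List Char) (c : Char) : Int := (((PySem.List.index? F c).getD 0 : Nat) : Int)

theorem buildChars_cons (C : List Char) (c : Char) (cs : List Char) :
    buildChars C (c :: cs) = buildChars (if C.contains c then C else C ++ [c]) cs := rfl

theorem buildChars_append (C : List Char) (xs ys : List Char) :
    buildChars C (xs ++ ys) = buildChars (buildChars C xs) ys := by
  simp [buildChars, List.foldl_append]

theorem buildChars_extend (cs : List Char) : ∀ C : List Char, ∃ t, buildChars C cs = C ++ t := by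
  induction cs with
  | nil => exact fun C => ⟨[], by simp [buildChars]⟩
  | cons c cs ih =>
    intro C
    rw [buildChars_cons]
    by_cases h : C.contains c
    · rw [if_pos h]; exact ih C
    · rw [if_neg h]
      obtain ⟨t, ht⟩ := ih (C ++ [c])
      exact ⟨c :: t, by simpa using ht⟩

theorem mem_buildChars_of_mem_base {c : Char} {C : List Char} (h : c ∈ C) (cs : List Char) :
    c ∈ buildChars C cs := by
  obtain ⟨t, ht⟩ := buildChars_extend cs C
  rw [ht]; exact List.mem_append_left _ h

theorem mem_buildChars_of_mem_arg {c : Char} (cs : List Char) :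
    ∀ C : List Char, c ∈ cs → c ∈ buildChars C cs := by
  induction cs with
  | nil => intro _ h; cases h
  | cons x cs ih =>
    intro C h
    rw [buildChars_cons]
    rcases List.mem_cons.1 h with h | h
    · subst h
      by_cases hx : C.contains c
      · rw [if_pos hx]; exact mem_buildChars_of_mem_base (by simpa using hx) cs
      · rw [if_neg hx]; exact mem_buildChars_of_mem_base (by simp) cs
    · exact ih _ h

theorem idxF_stable {c : Char} {C F : List Char} (hc : c ∈ C) (h : ∃ t, F = C ++ t) :
    idxF F c = idxF C c := by
  obtain ⟨t, rfl⟩ := h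
  unfold idxF
  rw [PySem.List.index?_append_of_mem t hc]

-- A's inner loop over one word: the final chars is buildChars, and the pattern reads every
-- character's index in the FINAL chars of that word (indices are stable under appending)
theorem aInner (cs : List Char) : ∀ (C : List Char) (P0 : List Int),
    cs.foldl aChar (C, P0) =
      (buildChars C cs, P0 ++ cs.map (fun c => idxF (buildChars C cs) c)) := by
  induction cs with
  | nil => intro C P0; simp [buildChars]
  | cons c cs ih =>
    intro C P0
    rw [List.foldl_cons, buildChars_cons]
    by_cases h : C.contains c
    · have hm : c ∈ C := by simpa using h
      have hstep : aChar (C, P0) c = (C, P0 ++ [idxF C c]) := by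
        unfold aChar idxF; rw [if_pos h]
      rw [hstep, ih, if_pos h]
      have he : idxF (buildChars C cs) c = idxF C c :=
        idxF_stable hm (buildChars_extend cs C)
      simp [he]
    · have hstep : aChar (C, P0) c = (C ++ [c], P0 ++ [idxF (C ++ [c]) c]) := by
        unfold aChar idxF; rw [if_neg h]
      rw [hstep, ih, if_neg h]
      have he : idxF (buildChars (C ++ [c]) cs) c = idxF (C ++ [c]) c :=
        idxF_stable (by simp) (buildChars_extend cs (C ++ [c]))
      simp [he]

-- A's outer loop: every word is encoded against the final global table
theorem aOuter (ws : List String) : ∀ (C : List Char) (Ps : List (List Int)),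
    ws.foldl aWordStep (C, Ps) =
    (buildChars C (ws.flatMap String.toList),
     Ps ++ ws.map (fun w => w.toList.map
       (fun c => idxF (buildChars C (ws.flatMap String.toList)) c))) := by
  induction ws with
  | nil => intro C Ps; simp [buildChars]
  | cons w ws ih =>
    intro C Ps
    have hstep : aWordStep (C, Ps) w
        = (buildChars C w.toList,
           Ps ++ [w.toList.map (fun c => idxF (buildChars C w.toList) c)]) := by
      unfold aWordStep
      rw [aInner w.toList C []]
      simp
    rw [List.foldl_cons, hstep, ih]
    have hflat : buildChars C ((w :: ws).flatMap String.toList)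
        = buildChars (buildChars C w.toList) (ws.flatMap String.toList) := by
      rw [List.flatMap_cons, buildChars_append]
    have hw : w.toList.map (fun c => idxF (buildChars C w.toList) c)
        = w.toList.map (fun c => idxF (buildChars C ((w :: ws).flatMap String.toList)) c) := by
      refine List.map_congr_left (fun c hc => ?_)
      rw [hflat]
      exact (idxF_stable (mem_buildChars_of_mem_arg w.toList C hc)
        (buildChars_extend (ws.flatMap String.toList) (buildChars C w.toList))).symm
    rw [← hflat]
    simp [hw]

-- Python's set(xs) is exactly the buildChars fold
theorem ofList_eq_buildChars (cs : List Char) : PySem.Set.ofList cs = buildChars [] cs := rfl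

-- KEY LEMMA: the first-appearance index of c in the deduplicated table equals the number of
-- distinct characters (relative to the seed C) in the prefix of cs before c's first occurrence
theorem idx_take (cs : List Char) : ∀ (C : List Char) (c : Char) (k : Nat), c ∉ C →
    PySem.List.index? cs c = some k →
    PySem.List.index? (buildChars C cs) c = some ((buildChars C (cs.take k)).length) := by
  induction cs with
  | nil =>
    intro C c k _ hk
    rw [(PySem.List.index?_eq_none_iff ([] : List Char) c).2 (by simp)] at hk
    cases hk
  | cons x cs ih =>
    intro C c k hC hk
    by_cases hcx : c = x
    · subst hcx
      rw [PySem.List.index?_cons_self] at hk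
      cases hk
      have hcont : C.contains c = false := by simpa using hC
      rw [buildChars_cons, hcont, if_neg (by simp)]
      obtain ⟨t, ht⟩ := buildChars_extend cs (C ++ [c])
      rw [ht, PySem.List.index?_append_of_mem t (by simp),
        PySem.List.index?_append_singleton_self C c hC]
      simp [buildChars]
    · rw [PySem.List.index?_cons_of_ne cs (Ne.symm hcx)] at hk
      rcases hk' : PySem.List.index? cs c with _ | k'
      · rw [hk'] at hk; cases hk
      · rw [hk'] at hk
        simp only [Option.map_some] at hk
        cases hk
        rw [List.take_succ_cons, buildChars_cons, buildChars_cons]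
        by_cases hx : C.contains x
        · rw [if_pos hx]
          exact ih C c k' hC hk'
        · rw [if_neg hx]
          exact ih (C ++ [x]) c k' (by simp [hC, hcx]) hk'

-- a dict built by folding insert of f over keys: lookup is f on the keys, untouched elsewhere
theorem code_get (f : Char → Int) (ks : List Char) :
    ∀ (d : PySem.Dict Char Int) (x : Char),
    ((ks.foldl (fun d c => d.insert c (f c)) d).get? x)
      = if x ∈ ks then some (f x) else d.get? x := by
  induction ks with
  | nil => intro d x; simp
  | cons k ks ih =>
    intro d x
    rw [List.foldl_cons, ih]
    by_cases hm : x ∈ ks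
    · rw [if_pos hm, if_pos (List.mem_cons_of_mem k hm)]
    · rw [if_neg hm, PySem.Dict.get?_insert]
      by_cases hx : x = k
      · subst hx; simp
      · rw [if_neg hx, if_neg (by simp [hx, hm])]

-- ===== VERDICT (by name: the statement is the Claim_ definition above) =====
theorem patterns_spec : Claim_equal_patterns := by
  unfold Claim_equal_patterns
  intro words _
  unfold Spec_patterns
  show patterns words = patterns_alt words
  have hA : patterns words =
      words.map (fun w => w.toList.map
        (fun c => idxF (buildChars [] (words.flatMap String.toList)) c)) := by
    unfold patterns
    rw [aOuter words [] []]
    simp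
  unfold patterns_alt
  rw [hA]
  refine List.map_congr_left (fun w hw => ?_)
  refine List.map_congr_left (fun c hc => ?_)
  have hcat : bCat words = words.flatMap String.toList := rfl
  have hcmem : c ∈ words.flatMap String.toList :=
    List.mem_flatMap.2 ⟨w, hw, hc⟩
  obtain ⟨k, hk⟩ := Option.isSome_iff_exists.1
    ((PySem.List.index?_isSome_iff (words.flatMap String.toList) c).2 hcmem)
  have hB : (bCode (bCat words)).get? c
      = some (PySem.Set.len (PySem.Set.ofList
          (PySem.List.slice (words.flatMap String.toList) none
            (some (((PySem.List.index? (words.flatMap String.toList) c).getD 0 : Nat) : Int))))) := by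
    unfold bCode
    rw [hcat, code_get, if_pos ((PySem.Set.mem_ofList (words.flatMap String.toList) c).2 hcmem)]
  rw [hB]
  rw [hk]
  simp only [Option.getD_some]
  rw [PySem.List.slice_to_natCast, ofList_eq_buildChars, PySem.Set.len]
  have hidx := idx_take (words.flatMap String.toList) [] c k (by simp) hk
  unfold idxF
  rw [hidx]
  simp
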